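-- pv_equiv track=rewrite | github.com/ignisdevelopper/ignisplateform | ignis-platform/backend/app/core/decision_point/sl_tp_calculator.py | _choose_candidate
-- ===== SOURCE A (Python) =====
-- from typing import Any, Optional, Protocol, runtime_checkable, Literal
--
-- TPMode = Literal["KEY_LEVEL", "RR_ONLY", "DP_LEVEL", "BEST_AVAILABLE"]
--
-- def _choose_candidate(candidates: list[dict[str, Any]], tp_mode: TPMode) -> Optional[dict[str, Any]]:
--     if not candidates:
--         return None
--
--     # Fill missing SL if needed (caller should set)
--     # (In our flow, KEY_LEVEL candidate was created with needs_sl=True; caller will set sl/rr)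
--     return_mode = tp_mode
--
--     # best-available = KL if exists else DP if exists else RR
--     if return_mode == "BEST_AVAILABLE":
--         for m in ("KEY_LEVEL", "DP_LEVEL", "RR"):
--             for c in candidates:
--                 if c.get("method") == m:
--                     return c
--         return candidates[0]
--
--     if return_mode == "KEY_LEVEL":
--         for c in candidates:
--             if c.get("method") == "KEY_LEVEL":
--                 return c
--         return None
--
--     if return_mode == "DP_LEVEL":
--         for c in candidates:
--             if c.get("method") == "DP_LEVEL":
--                 return c
--         return None
--
--     if return_mode == "RR_ONLY":
--         for c in candidates:
--             if c.get("method") == "RR":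
--                 return c
--         return None
--
--     return candidates[0]
-- ===== SOURCE B (Python) =====
-- from typing import Any, Optional
--
-- def _choose_candidate(candidates: list[dict[str, Any]], tp_mode) -> Optional[dict[str, Any]]:
--     if not candidates:
--         return None
--     # single-pass stable argmin: rank each candidate by mode-specific preference,
--     # keep the first candidate with the smallest rank (strict < => earliest wins)
--     if tp_mode == "BEST_AVAILABLE":
--         def rank(m):
--             if m == "KEY_LEVEL":
--                 return 0
--             if m == "DP_LEVEL":
--                 return 1
--             if m == "RR":
--                 return 2
--             return None
--         fallback = candidates[0]
--     elif tp_mode in ("KEY_LEVEL", "DP_LEVEL", "RR_ONLY"):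
--         target = "RR" if tp_mode == "RR_ONLY" else tp_mode
--         def rank(m):
--             return 0 if m == target else None
--         fallback = None
--     else:
--         return candidates[0]
--     best, best_rank = None, 3
--     for c in candidates:
--         r = rank(c.get("method"))
--         if r is not None and r < best_rank:
--             best, best_rank = c, r
--     return best if best is not None else fallback
-- ===== Notes on version B (the rewrite author's own statement) =====
-- stated objective: alternative
-- what changed: B replaces A's per-method staged scans (up to three passes plus a branch per mode) by a single-pass stable argmin: each candidate gets a mode-specific numeric rank and one loop keeps the earliest candidate with the minimal rank.
import Mathlib
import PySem

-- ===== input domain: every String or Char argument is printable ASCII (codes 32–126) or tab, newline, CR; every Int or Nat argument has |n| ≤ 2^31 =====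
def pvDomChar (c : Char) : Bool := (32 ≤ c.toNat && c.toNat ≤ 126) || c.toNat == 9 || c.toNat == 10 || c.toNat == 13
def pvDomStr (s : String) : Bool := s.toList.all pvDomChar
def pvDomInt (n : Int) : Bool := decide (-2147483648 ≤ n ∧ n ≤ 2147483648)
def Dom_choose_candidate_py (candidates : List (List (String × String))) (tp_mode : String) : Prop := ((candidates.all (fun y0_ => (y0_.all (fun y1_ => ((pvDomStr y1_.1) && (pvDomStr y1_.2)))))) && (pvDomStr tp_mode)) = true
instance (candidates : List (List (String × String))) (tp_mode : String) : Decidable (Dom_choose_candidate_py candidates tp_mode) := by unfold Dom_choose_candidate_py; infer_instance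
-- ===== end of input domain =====

-- B selects the result in one pass as a stable argmin over a mode-specific rank, replacing A's staged per-method scans (alternative structure, same cost).


-- ===== PORT A =====
-- c.get("method"): first-match lookup in the candidate dict (assoc list)
def pvMethodOf (c : List (String × String)) : Option String :=
  (PySem.Dict.mk c).get? "method"

-- 'for c in candidates: if c.get("method") == m: return c'
def pvScanA (candidates : List (List (String × String))) (m : String) : Option (List (String × String)) :=
  candidates.find? (fun c => pvMethodOf c == some m)

def choose_candidate_py (candidates : List (List (String × String))) (tp_mode : String) : Option (List (String × String)) :=
  if candidates = [] then none
  else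
    let return_mode := tp_mode
    if return_mode = "BEST_AVAILABLE" then
      -- 'for m in ("KEY_LEVEL", "DP_LEVEL", "RR"): for c in candidates: …'
      match pvScanA candidates "KEY_LEVEL" with
      | some c => some c
      | none =>
        match pvScanA candidates "DP_LEVEL" with
        | some c => some c
        | none =>
          match pvScanA candidates "RR" with
          | some c => some c
          | none => PySem.List.pyGet? candidates 0
    else if return_mode = "KEY_LEVEL" then pvScanA candidates "KEY_LEVEL"
    else if return_mode = "DP_LEVEL" then pvScanA candidates "DP_LEVEL"
    else if return_mode = "RR_ONLY" then pvScanA candidates "RR"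
    else PySem.List.pyGet? candidates 0

-- ===== PORT B =====
-- B's BEST_AVAILABLE rank function ('def rank(m): if m == "KEY_LEVEL": return 0 …')
def pvRankBA (m : Option String) : Option Int :=
  if m = some "KEY_LEVEL" then some 0
  else if m = some "DP_LEVEL" then some 1
  else if m = some "RR" then some 2
  else none

-- B's specific-mode rank function ('return 0 if m == target else None')
def pvRankOnly (target : String) (m : Option String) : Option Int :=
  if m = some target then some 0 else none

-- B's loop: 'best, best_rank = None, 3; for c in candidates: r = rank(...); if r is not None and r < best_rank: best, best_rank = c, r'
def pvSelect (rank : Option String → Option Int)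
    (candidates : List (List (String × String))) : Option (List (String × String)) :=
  (candidates.foldl (fun s c =>
      match rank (pvMethodOf c) with
      | some r => if r < s.2 then (some c, r) else s
      | none => s)
    ((none : Option (List (String × String))), (3 : Int))).1

def choose_candidate_py_alt (candidates : List (List (String × String))) (tp_mode : String) : Option (List (String × String)) :=
  if candidates = [] then none
  else if tp_mode = "BEST_AVAILABLE" then
    -- 'return best if best is not None else fallback' with fallback = candidates[0]
    match pvSelect pvRankBA candidates with
    | some c => some c
    | none => PySem.List.pyGet? candidates 0
  else if tp_mode = "KEY_LEVEL" ∨ tp_mode = "DP_LEVEL" ∨ tp_mode = "RR_ONLY" then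
    -- fallback = None, so the selection result is returned as is
    pvSelect (pvRankOnly (if tp_mode = "RR_ONLY" then "RR" else tp_mode)) candidates
  else PySem.List.pyGet? candidates 0

-- ===== PRECONDITION & SPEC =====
def Spec_choose_candidate_py (candidates : List (List (String × String))) (tp_mode : String) (out : Option (List (String × String))) : Prop := out = choose_candidate_py_alt candidates tp_mode
instance (candidates : List (List (String × String))) (tp_mode : String) (out : Option (List (String × String))) : Decidable (Spec_choose_candidate_py candidates tp_mode out) := by unfold Spec_choose_candidate_py; infer_instance

-- ===== CLAIM (what is proved, stated in full; the proofs are below) =====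
def Claim_equal_choose_candidate_py : Prop := ∀ (candidates : List (List (String × String))) (tp_mode : String), Dom_choose_candidate_py candidates tp_mode → Spec_choose_candidate_py candidates tp_mode (choose_candidate_py candidates tp_mode)

-- ===== LEMMAS AND PROOFS =====

-- abbreviation for B's loop body
def pvStep (rank : Option String → Option Int)
    (s : Option (List (String × String)) × Int) (c : List (String × String)) :
    Option (List (String × String)) × Int :=
  match rank (pvMethodOf c) with
  | some r => if r < s.2 then (some c, r) else s
  | none => s

theorem pvSelect_eq_foldl (rank : Option String → Option Int) (cs : List (List (String × String))) :
    pvSelect rank cs = (cs.foldl (pvStep rank) (none, 3)).1 := rfl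

-- once best_rank = 0, nothing replaces the best (all BA ranks are ≥ 0)
theorem pvBA_rank0 (cs : List (List (String × String))) (b : List (String × String)) :
    cs.foldl (pvStep pvRankBA) (some b, 0) = (some b, 0) := by
  induction cs with
  | nil => rfl
  | cons c cs ih =>
    have : pvStep pvRankBA (some b, 0) c = (some b, 0) := by
      unfold pvStep pvRankBA
      split_ifs <;> simp
    simp [List.foldl_cons, this, ih]

-- from best_rank = 1, only a KEY_LEVEL candidate can replace the best
theorem pvBA_rank1 (cs : List (List (String × String))) (b : List (String × String)) :
    (cs.foldl (pvStep pvRankBA) (some b, 1)).1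
      = (pvScanA cs "KEY_LEVEL").getD b := by
  induction cs with
  | nil => rfl
  | cons c cs ih =>
    by_cases hK : pvMethodOf c = some "KEY_LEVEL"
    · simp [List.foldl_cons, pvStep, pvRankBA, hK, pvScanA, pvBA_rank0]
    · have : pvStep pvRankBA (some b, 1) c = (some b, 1) := by
        unfold pvStep pvRankBA
        split_ifs <;> simp_all
      simp [List.foldl_cons, this, ih, pvScanA, hK]

-- from best_rank = 2, a KEY_LEVEL then a DP_LEVEL candidate can replace the best
theorem pvBA_rank2 (cs : List (List (String × String))) (b : List (String × String)) :
    (cs.foldl (pvStep pvRankBA) (some b, 2)).1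
      = ((pvScanA cs "KEY_LEVEL").orElse fun _ => (pvScanA cs "DP_LEVEL")).getD b := by
  induction cs with
  | nil => rfl
  | cons c cs ih =>
    by_cases hK : pvMethodOf c = some "KEY_LEVEL"
    · simp [List.foldl_cons, pvStep, pvRankBA, hK, pvScanA, pvBA_rank0]
    · by_cases hD : pvMethodOf c = some "DP_LEVEL"
      · simp [List.foldl_cons, pvStep, pvRankBA, hD, pvScanA, pvBA_rank1, Option.orElse]
        cases List.find? (fun c => pvMethodOf c == some "KEY_LEVEL") cs <;> simp
      · have : pvStep pvRankBA (some b, 2) c = (some b, 2) := by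
          unfold pvStep pvRankBA
          split_ifs <;> simp_all
        simp [List.foldl_cons, this, ih, pvScanA, hK, hD]

-- B's single-pass argmin for BEST_AVAILABLE equals A's staged scans
theorem pvSelect_BA (cs : List (List (String × String))) :
    pvSelect pvRankBA cs
      = ((pvScanA cs "KEY_LEVEL").orElse fun _ =>
          ((pvScanA cs "DP_LEVEL").orElse fun _ => pvScanA cs "RR")) := by
  rw [pvSelect_eq_foldl]
  induction cs with
  | nil => rfl
  | cons c cs ih =>
    by_cases hK : pvMethodOf c = some "KEY_LEVEL"
    · simp [List.foldl_cons, pvStep, pvRankBA, hK, pvScanA, pvBA_rank0,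
            Option.orElse]
    · by_cases hD : pvMethodOf c = some "DP_LEVEL"
      · simp [List.foldl_cons, pvStep, pvRankBA, hD, pvScanA, pvBA_rank1, Option.orElse]
        cases List.find? (fun c => pvMethodOf c == some "KEY_LEVEL") cs <;> simp
      · by_cases hR : pvMethodOf c = some "RR"
        · simp [List.foldl_cons, pvStep, pvRankBA, hK, hD, hR, pvScanA, pvBA_rank2, Option.orElse]
          cases List.find? (fun c => pvMethodOf c == some "KEY_LEVEL") cs <;>
            cases List.find? (fun c => pvMethodOf c == some "DP_LEVEL") cs <;> simp
        · have : pvStep pvRankBA (none, 3) c = (none, 3) := by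
            simp [pvStep, pvRankBA, hK, hD, hR]
          simp [List.foldl_cons, this, ih, pvScanA, hK, hD, hR]

-- once a target match is held, nothing replaces it in the specific-mode loop
theorem pvOnly_rank0 (t : String) (cs : List (List (String × String))) (b : List (String × String)) :
    cs.foldl (pvStep (pvRankOnly t)) (some b, 0) = (some b, 0) := by
  induction cs with
  | nil => rfl
  | cons c cs ih =>
    have : pvStep (pvRankOnly t) (some b, 0) c = (some b, 0) := by
      unfold pvStep pvRankOnly
      split_ifs <;> simp
    simp [List.foldl_cons, this, ih]

-- B's single-pass argmin for a specific mode equals A's single scan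
theorem pvSelect_only (t : String) (cs : List (List (String × String))) :
    pvSelect (pvRankOnly t) cs = pvScanA cs t := by
  rw [pvSelect_eq_foldl]
  induction cs with
  | nil => rfl
  | cons c cs ih =>
    by_cases h : pvMethodOf c = some t
    · simp [List.foldl_cons, pvStep, pvRankOnly, h, pvScanA, pvOnly_rank0]
    · have : pvStep (pvRankOnly t) (none, 3) c = (none, 3) := by
        simp [pvStep, pvRankOnly, h]
      simp [List.foldl_cons, this, ih, pvScanA, h]

-- ===== VERDICT (by name: the statement is the Claim_ definition above) =====
theorem choose_candidate_py_spec : Claim_equal_choose_candidate_py := by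
  intro candidates tp_mode _
  unfold Spec_choose_candidate_py choose_candidate_py choose_candidate_py_alt
  by_cases h0 : candidates = []
  · simp [h0]
  · simp only [h0, if_false]
    by_cases hB : tp_mode = "BEST_AVAILABLE" <;>
    by_cases hK : tp_mode = "KEY_LEVEL" <;>
    by_cases hD : tp_mode = "DP_LEVEL" <;>
    by_cases hR : tp_mode = "RR_ONLY" <;>
      simp_all [pvSelect_BA, pvSelect_only, Option.orElse] <;>
      rcases hk : pvScanA candidates "KEY_LEVEL" <;>
      rcases hd : pvScanA candidates "DP_LEVEL" <;>
      rcases hr : pvScanA candidates "RR" <;> simp
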